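-- pv_equiv track=rewrite | github.com/XDUgaile/Intelligent-Model-based-Ransomware-Detection-System | 毕设代码.py | build_mappings
-- ===== SOURCE A (Python) =====
-- def build_mappings(triples):
--     ent2id, rel2id = {}, {}
--     for h, r, t in triples:
--         for e in (h, t):
--             if e not in ent2id:
--                 ent2id[e] = len(ent2id)
--         if r not in rel2id:
--             rel2id[r] = len(rel2id)
--     return ent2id, rel2id
-- ===== SOURCE B (Python) =====
-- def build_mappings(triples):
--     ents, rels = [], []
--     for h, r, t in triples:
--         ents.extend((h, t))
--         rels.append(r)
--     ent2id = {e: i for i, e in enumerate(dict.fromkeys(ents))}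
--     rel2id = {r: i for i, r in enumerate(dict.fromkeys(rels))}
--     return ent2id, rel2id
-- ===== Notes on version B (the rewrite author's own statement) =====
-- stated objective: idiomatic
-- what changed: Replaces the interleaved membership-check-and-assign loop with a collect-then-dedup shape: one pass gathers flat entity and relation streams, then dict.fromkeys dedups preserving first appearance and enumerate assigns ids.
import Mathlib
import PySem

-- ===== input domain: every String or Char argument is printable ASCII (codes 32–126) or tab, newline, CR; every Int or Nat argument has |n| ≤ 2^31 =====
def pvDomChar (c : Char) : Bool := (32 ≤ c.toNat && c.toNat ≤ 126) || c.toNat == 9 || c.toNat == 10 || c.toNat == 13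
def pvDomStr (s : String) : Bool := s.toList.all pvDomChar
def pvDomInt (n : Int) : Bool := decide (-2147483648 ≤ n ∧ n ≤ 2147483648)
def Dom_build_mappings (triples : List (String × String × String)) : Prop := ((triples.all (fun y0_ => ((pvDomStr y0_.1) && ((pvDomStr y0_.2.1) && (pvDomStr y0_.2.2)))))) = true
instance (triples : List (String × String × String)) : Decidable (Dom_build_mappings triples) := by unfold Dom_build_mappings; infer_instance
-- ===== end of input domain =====

-- B replaces A's interleaved membership-check loop by collect-then-dedup-and-enumerate (idiomatic decomposition, same cost).


-- ===== PORT A =====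
-- `if e not in ent2id: ent2id[e] = len(ent2id)`
def bmEntStep (d : PySem.Dict String Int) (e : String) : PySem.Dict String Int :=
  if d.contains e = false then d.insert e (d.size : Int) else d

-- one iteration of A's `for h, r, t in triples` body
def bmStepA (st : PySem.Dict String Int × PySem.Dict String Int) (tr : String × String × String) :
    PySem.Dict String Int × PySem.Dict String Int :=
  let ent2id := [tr.1, tr.2.2].foldl bmEntStep st.1      -- `for e in (h, t)`
  let rel2id := if st.2.contains tr.2.1 = false then st.2.insert tr.2.1 (st.2.size : Int) else st.2
  (ent2id, rel2id)

def build_mappings (triples : List (String × String × String)) : (List (String × Int)) × (List (String × Int)) :=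
  let p := triples.foldl bmStepA (PySem.Dict.empty, PySem.Dict.empty)
  (p.1.items, p.2.items)

-- ===== PORT B =====
-- `{e: i for i, e in enumerate(...)}` — a dict on distinct keys, as its association list
def bmEnum (xs : List String) : List (String × Int) :=
  xs.zipIdx.map (fun p => (p.1, (p.2 : Int)))

def build_mappings_alt (triples : List (String × String × String)) : (List (String × Int)) × (List (String × Int)) :=
  let p := triples.foldl
    (fun (st : List String × List String) tr => (st.1 ++ [tr.1, tr.2.2], st.2 ++ [tr.2.1]))
    ([], [])
  (bmEnum (PySem.List.dedup p.1), bmEnum (PySem.List.dedup p.2))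

-- ===== PRECONDITION & SPEC =====
def Spec_build_mappings (triples : List (String × String × String)) (out : (List (String × Int)) × (List (String × Int))) : Prop := out = build_mappings_alt triples
instance (triples : List (String × String × String)) (out : (List (String × Int)) × (List (String × Int))) : Decidable (Spec_build_mappings triples out) := by unfold Spec_build_mappings; infer_instance

-- ===== CLAIM (what is proved, stated in full; the proofs are below) =====
def Claim_equal_build_mappings : Prop := ∀ (triples : List (String × String × String)), Dom_build_mappings triples → Spec_build_mappings triples (build_mappings triples)

-- ===== LEMMAS AND PROOFS =====

theorem bmEnum_append_singleton (xs : List String) (e : String) :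
    bmEnum (xs ++ [e]) = bmEnum xs ++ [(e, (xs.length : Int))] := by
  simp [bmEnum, List.zipIdx_append]

theorem bmEnum_fst (xs : List String) : (bmEnum xs).map Prod.fst = xs := by
  induction xs with
  | nil => rfl
  | cons a t ih =>
      simp [bmEnum, List.zipIdx_succ] at *
      simpa [Function.comp] using ih

theorem bmEnum_length (xs : List String) : (bmEnum xs).length = xs.length := by
  simp [bmEnum]

theorem contains_of_items (d : PySem.Dict String Int) (s : List String)
    (h : d.items = bmEnum s) (e : String) : d.contains e = s.contains e := by
  have h1 : d.contains e = ((bmEnum s).map Prod.fst).any (fun x => x == e) := by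
    rw [List.any_map]; exact h ▸ rfl
  rw [h1, bmEnum_fst]; exact List.any_beq'

theorem bmEntStep_items (d : PySem.Dict String Int) (s : List String)
    (h : d.items = bmEnum s) (e : String) :
    (bmEntStep d e).items = bmEnum (PySem.Set.add s e) := by
  have hc := contains_of_items d s h e
  unfold bmEntStep PySem.Set.add
  by_cases hm : e ∈ s
  · have hcon : d.contains e = true := by rw [hc]; simpa using hm
    rw [if_neg (by simp [hcon]), if_pos (by simpa [PySem.Set.contains] using hm)]
    exact h
  · have hcon : d.contains e = false := by rw [hc]; simpa using hm
    have hsize : d.size = s.length := by simp [PySem.Dict.size, h, bmEnum_length]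
    rw [if_pos hcon, if_neg (by simpa [PySem.Set.contains] using hm)]
    rw [PySem.Dict.insert, if_neg (by simp [hcon])]
    show d.items ++ [(e, (d.size : Int))] = bmEnum (s ++ [e])
    rw [h, hsize, bmEnum_append_singleton]

theorem dedup_append_singleton (l : List String) (e : String) :
    PySem.List.dedup (l ++ [e]) = PySem.Set.add (PySem.List.dedup l) e := by
  simp [PySem.List.dedup, PySem.Set.ofList, List.foldl_append]

theorem bm_fold_inv (ts : List (String × String × String))
    (d1 d2 : PySem.Dict String Int) (l1 l2 : List String)
    (h1 : d1.items = bmEnum (PySem.List.dedup l1))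
    (h2 : d2.items = bmEnum (PySem.List.dedup l2)) :
    (ts.foldl bmStepA (d1, d2)).1.items
      = bmEnum (PySem.List.dedup ((ts.foldl
          (fun (st : List String × List String) tr => (st.1 ++ [tr.1, tr.2.2], st.2 ++ [tr.2.1]))
          (l1, l2)).1))
    ∧ (ts.foldl bmStepA (d1, d2)).2.items
      = bmEnum (PySem.List.dedup ((ts.foldl
          (fun (st : List String × List String) tr => (st.1 ++ [tr.1, tr.2.2], st.2 ++ [tr.2.1]))
          (l1, l2)).2)) := by
  induction ts generalizing d1 d2 l1 l2 with
  | nil => exact ⟨h1, h2⟩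
  | cons tr rest ih =>
      obtain ⟨h, r, t⟩ := tr
      apply ih
      · -- entities: two bmEntStep applications
        have e2 : PySem.List.dedup (l1 ++ [h, t])
            = PySem.Set.add (PySem.Set.add (PySem.List.dedup l1) h) t := by
          rw [show l1 ++ [h, t] = (l1 ++ [h]) ++ [t] by simp,
            dedup_append_singleton, dedup_append_singleton]
        show (bmEntStep (bmEntStep d1 h) t).items = bmEnum (PySem.List.dedup (l1 ++ [h, t]))
        rw [e2]
        exact bmEntStep_items _ _ (bmEntStep_items d1 _ h1 h) t
      · -- relations: one step
        show (bmEntStep d2 r).items = bmEnum (PySem.List.dedup (l2 ++ [r]))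
        rw [dedup_append_singleton]
        exact bmEntStep_items d2 _ h2 r

-- ===== VERDICT (by name: the statement is the Claim_ definition above) =====
theorem build_mappings_spec : Claim_equal_build_mappings := by
  intro triples _
  unfold Spec_build_mappings build_mappings build_mappings_alt
  have := bm_fold_inv triples PySem.Dict.empty PySem.Dict.empty [] []
    (by rfl) (by rfl)
  exact Prod.ext this.1 this.2
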